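-- pv_equiv track=rewrite | github.com/wadou42/tmp-autotunning | search_result/ir2vec.search/redis.SA/autoturning/constrains_solver.py | get_opt_negation
-- ===== SOURCE A (Python) =====
-- def get_opt_negation(option: str) -> str:
--     option = option.strip()
--     if not option:
--         return ""
--
--     if '=' in option:
--         return ''
--
--     # Define common negation rules
--     # Note: Longer prefixes (like "-fno-") must be checked before shorter ones (like "-f")
--     negation_rules = [
--         ("-fno-", "-f"),
--         ("-f", "-fno-"),
--         ("-mno-", "-m"),
--         ("-m", "-mno-"),
--         ("-Wno-", "-W"),
--         ("-W", "-Wno-"),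
--     ]
--
--     for prefix, negated_prefix in negation_rules:
--         if option.startswith(prefix):
--             return negated_prefix + option[len(prefix):]
--     return ""
-- ===== SOURCE B (Python) =====
-- def get_opt_negation(option: str) -> str:
--     option = option.strip()
--     if not option:
--         return ""
--
--     if '=' in option:
--         return ''
--
--     # Toggle the 'no-' marker per flag family instead of an ordered rule table.
--     for c in ('f', 'm', 'W'):
--         if option.startswith('-' + c):
--             rest = option[2:]
--             if rest.startswith('no-'):
--                 return '-' + c + rest[3:]
--             return '-' + c + 'no-' + rest
--     return ""
-- ===== Notes on version B (the rewrite author's own statement) =====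
-- stated objective: alternative
-- what changed: replaces the ordered 6-entry (prefix, replacement) rule table with a loop over the three flag families 'f'/'m'/'W' that detects and toggles the 'no-' marker after the family letter
import Mathlib
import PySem

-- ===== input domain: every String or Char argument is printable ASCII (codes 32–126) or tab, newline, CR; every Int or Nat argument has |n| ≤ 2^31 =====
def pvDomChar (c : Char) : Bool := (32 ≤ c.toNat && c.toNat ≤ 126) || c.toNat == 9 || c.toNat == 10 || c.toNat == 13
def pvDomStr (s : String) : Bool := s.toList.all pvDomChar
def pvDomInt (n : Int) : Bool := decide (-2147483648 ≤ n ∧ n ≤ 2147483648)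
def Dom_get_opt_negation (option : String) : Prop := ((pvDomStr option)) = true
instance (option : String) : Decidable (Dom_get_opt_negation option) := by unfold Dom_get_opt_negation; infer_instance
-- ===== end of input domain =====

-- B replaces A's ordered 6-entry prefix rule table by a per-family ('f'/'m'/'W') toggle of the 'no-' marker; same cost, different decomposition.

-- ===== PORT A =====
def pvNegationRules : List (String × String) :=
  [("-fno-", "-f"), ("-f", "-fno-"), ("-mno-", "-m"), ("-m", "-mno-"), ("-Wno-", "-W"), ("-W", "-Wno-")]

def pvRuleLoop (rules : List (String × String)) (opt : String) : String :=
  match rules with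
  | [] => ""
  | (pre, npre) :: rest =>
    if PySem.Str.startswith opt pre then npre ++ PySem.Str.slice opt (some (PySem.Str.len pre)) none
    else pvRuleLoop rest opt

def get_opt_negation (option : String) : String :=
  let o := PySem.Str.strip option
  if o = "" then ""
  else if PySem.Str.isIn "=" o then ""
  else pvRuleLoop pvNegationRules o

-- ===== PORT B =====
def pvFamLoop (cs : List Char) (opt : String) : String :=
  match cs with
  | [] => ""
  | c :: cs' =>
    if PySem.Str.startswith opt ("-" ++ String.ofList [c]) then
      let rest := PySem.Str.slice opt (some 2) none
      if PySem.Str.startswith rest "no-" then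
        "-" ++ String.ofList [c] ++ PySem.Str.slice rest (some 3) none
      else
        "-" ++ String.ofList [c] ++ "no-" ++ rest
    else pvFamLoop cs' opt

def get_opt_negation_alt (option : String) : String :=
  let o := PySem.Str.strip option
  if o = "" then ""
  else if PySem.Str.isIn "=" o then ""
  else pvFamLoop ['f', 'm', 'W'] o

-- ===== PRECONDITION & SPEC =====
def Spec_get_opt_negation (option : String) (out : String) : Prop := out = get_opt_negation_alt option
instance (option : String) (out : String) : Decidable (Spec_get_opt_negation option out) := by unfold Spec_get_opt_negation; infer_instance

-- ===== CLAIM (what is proved, stated in full; the proofs are below) =====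
def Claim_equal_get_opt_negation : Prop := ∀ (option : String), Dom_get_opt_negation option → Spec_get_opt_negation option (get_opt_negation option)

-- ===== LEMMAS AND PROOFS =====

-- the two loops agree on every string
theorem pv_loops_eq (s : String) : pvRuleLoop pvNegationRules s = pvFamLoop ['f', 'm', 'W'] s := by
  have hf5 : ("-fno-" : String).toList = ['-','f','n','o','-'] := by decide
  have hm5 : ("-mno-" : String).toList = ['-','m','n','o','-'] := by decide
  have hw5 : ("-Wno-" : String).toList = ['-','W','n','o','-'] := by decide
  have hf2 : ("-f" : String).toList = ['-','f'] := by decide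
  have hm2 : ("-m" : String).toList = ['-','m'] := by decide
  have hw2 : ("-W" : String).toList = ['-','W'] := by decide
  have hno : ("no-" : String).toList = ['n','o','-'] := by decide
  have hd : ("-" : String).toList = ['-'] := by decide
  have l5 : PySem.Str.len "-fno-" = 5 := by decide
  have l5m : PySem.Str.len "-mno-" = 5 := by decide
  have l5w : PySem.Str.len "-Wno-" = 5 := by decide
  have l2f : PySem.Str.len "-f" = 2 := by decide
  have l2m : PySem.Str.len "-m" = 2 := by decide
  have l2w : PySem.Str.len "-W" = 2 := by decide
  rw [← String.toList_inj]
  simp only [pvRuleLoop, pvNegationRules, pvFamLoop, PySem.Str.startswith_eq, PySem.Chars.startswith,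
    apply_ite String.toList, String.toList_append, PySem.Str.toList_slice, PySem.Chars.slice_eq_listSlice,
    hf5, hm5, hw5, hf2, hm2, hw2, hno, hd, l5, l5m, l5w, l2f, l2m, l2w,
    String.toList_ofList, List.cons_append, List.nil_append]
  rw [show PySem.List.slice s.toList (some 2) none = s.toList.drop 2 from by
        simpa using PySem.List.slice_from_natCast s.toList 2]
  rw [show PySem.List.slice s.toList (some 5) none = s.toList.drop 5 from by
        simpa using PySem.List.slice_from_natCast s.toList 5]
  rw [show ∀ l : List Char, PySem.List.slice l (some 3) none = l.drop 3 from fun l => by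
        simpa using PySem.List.slice_from_natCast l 3]
  simp only [List.drop_drop]
  generalize s.toList = l
  rcases l with _ | ⟨a, _ | ⟨b, r⟩⟩
  · simp [List.isPrefixOf]
  · simp [List.isPrefixOf]
  · simp only [List.isPrefixOf, List.drop_succ_cons, List.drop_zero]
    split_ifs <;> simp_all <;> tauto

-- ===== VERDICT (by name: the statement is the Claim_ definition above) =====
theorem get_opt_negation_spec : Claim_equal_get_opt_negation := by
  intro option _
  unfold Spec_get_opt_negation get_opt_negation get_opt_negation_alt
  by_cases h1 : PySem.Str.strip option = ""
  · simp [h1]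
  · simp [h1, pv_loops_eq]
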